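-- pv_equiv track=rewrite | github.com/Renzzo98/DailyDealRedditBot | main.py | identifyPCPart
-- ===== SOURCE A (Python) =====
-- def identifyPCPart(title):
--     if (title != None):
--         partID = ""
--         recording = False
--         for char in title:
--             if (char == "["):
--                 recording = True
--             elif (char == "]"):
--                 recording = False
--             else:
--                 if (recording):
--                     partID += char
--         return partID.upper()
--     else:
--         raise ValueError("Title was not provided when identifing Part")
-- ===== SOURCE B (Python) =====
-- import re
--
-- def identifyPCPart(title):
--     if title is None:
--         raise ValueError("Title was not provided when identifing Part")
--     return "".join(re.findall(r"\[([^\[\]]*)", title)).upper()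
-- ===== Notes on version B (the rewrite author's own statement) =====
-- stated objective: faster
-- what changed: Replaces the character-by-character toggle loop with a single regex findall that captures each run of non-bracket characters following an opening bracket, joined and uppercased.
import Mathlib
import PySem

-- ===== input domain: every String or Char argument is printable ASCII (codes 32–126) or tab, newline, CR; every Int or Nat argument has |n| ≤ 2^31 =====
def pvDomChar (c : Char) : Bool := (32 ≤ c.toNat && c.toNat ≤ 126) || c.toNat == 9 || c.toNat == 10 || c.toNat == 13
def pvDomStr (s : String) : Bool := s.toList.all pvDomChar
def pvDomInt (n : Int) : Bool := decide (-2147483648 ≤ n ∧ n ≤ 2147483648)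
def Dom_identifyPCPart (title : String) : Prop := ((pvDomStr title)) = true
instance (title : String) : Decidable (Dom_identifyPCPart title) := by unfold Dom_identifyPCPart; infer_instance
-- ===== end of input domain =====

-- ===== PORT A =====
-- B replaces A's toggle loop with a regex-style scan collecting bracket-opened runs (idiomatic); values proved equal.
def identifyPCPart (title : String) : String :=
  let st := title.toList.foldl
    (fun (s : List Char × Bool) char =>
      if char = '[' then (s.1, true)
      else if char = ']' then (s.1, false)
      else if s.2 then (s.1 ++ [char], s.2) else s)
    (([] : List Char), false)
  PySem.Str.upper (String.ofList st.1)

-- ===== PORT B =====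
-- the regex character class [^\[\]]
def pvNB (d : Char) : Bool := d ≠ '[' && d ≠ ']'

-- hand port of re.findall(r"\[([^\[\]]*)", title) ++ join: after each '[', capture the run of non-bracket chars
def pvFindall : List Char → List Char
  | [] => []
  | c :: rest =>
    if c = '[' then
      rest.takeWhile pvNB ++ pvFindall (rest.dropWhile pvNB)
    else pvFindall rest
termination_by l => l.length
decreasing_by
  · exact Nat.lt_succ_of_le (List.length_dropWhile_le _ _)
  · exact Nat.lt_succ_of_le (Nat.le_refl _)

def identifyPCPart_alt (title : String) : String :=
  PySem.Str.upper (String.ofList (pvFindall title.toList))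

-- ===== PRECONDITION & SPEC =====
def Spec_identifyPCPart (title : String) (out : String) : Prop := out = identifyPCPart_alt title
instance (title : String) (out : String) : Decidable (Spec_identifyPCPart title out) := by unfold Spec_identifyPCPart; infer_instance

-- ===== CLAIM (what is proved, stated in full; the proofs are below) =====
def Claim_equal_identifyPCPart : Prop := ∀ (title : String), Dom_identifyPCPart title → Spec_identifyPCPart title (identifyPCPart title)

-- ===== LEMMAS AND PROOFS =====
-- recursive characterisation of A's toggle loop
def pvScanA (rec : Bool) : List Char → List Char
  | [] => []
  | c :: rest =>
    if c = '[' then pvScanA true rest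
    else if c = ']' then pvScanA false rest
    else if rec then c :: pvScanA true rest else pvScanA false rest

theorem pvFoldl_eq_scanA (l : List Char) : ∀ (acc : List Char) (rec : Bool),
    (l.foldl
      (fun (s : List Char × Bool) char =>
        if char = '[' then (s.1, true)
        else if char = ']' then (s.1, false)
        else if s.2 then (s.1 ++ [char], s.2) else s)
      (acc, rec)).1 = acc ++ pvScanA rec l := by
  induction l with
  | nil => intro acc rec; simp [pvScanA]
  | cons c rest ih =>
    intro acc rec
    by_cases h1 : c = '['
    · simp [pvScanA, h1, ih]
    · by_cases h2 : c = ']'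
      · simp [pvScanA, h2, ih]
      · cases rec <;> simp [pvScanA, h1, h2, ih]

theorem pvScanA_eq_findall (l : List Char) :
    pvScanA false l = pvFindall l ∧
    pvScanA true l = l.takeWhile pvNB ++ pvFindall (l.dropWhile pvNB) := by
  induction l with
  | nil => simp [pvScanA, pvFindall]
  | cons c rest ih =>
    by_cases h1 : c = '['
    · have hp : pvNB c = false := by simp [pvNB, h1]
      constructor
      · rw [pvScanA, if_pos h1, ih.2, pvFindall, if_pos h1]
      · rw [pvScanA, if_pos h1, List.takeWhile_cons, List.dropWhile_cons, hp]
        simp only [Bool.false_eq_true, if_false, List.nil_append]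
        rw [pvFindall, if_pos h1, ih.2]
    · by_cases h2 : c = ']'
      · have hp : pvNB c = false := by simp [pvNB, h2]
        constructor
        · rw [pvScanA, if_neg h1, if_pos h2, ih.1, pvFindall, if_neg h1]
        · rw [pvScanA, if_neg h1, if_pos h2, List.takeWhile_cons, List.dropWhile_cons, hp]
          simp only [Bool.false_eq_true, if_false, List.nil_append]
          rw [pvFindall, if_neg h1, ih.1]
      · have hp : pvNB c = true := by simp [pvNB, h1, h2]
        constructor
        · rw [pvScanA, if_neg h1, if_neg h2]
          simp only [Bool.false_eq_true, if_false]
          rw [ih.1, pvFindall, if_neg h1]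
        · rw [pvScanA, if_neg h1, if_neg h2, List.takeWhile_cons, List.dropWhile_cons, hp]
          simp only [if_true, List.cons_append]
          rw [ih.2]

-- ===== VERDICT (by name: the statement is the Claim_ definition above) =====
theorem identifyPCPart_spec : Claim_equal_identifyPCPart := by
  intro title _
  show identifyPCPart title = identifyPCPart_alt title
  simp only [identifyPCPart, identifyPCPart_alt, pvFoldl_eq_scanA, List.nil_append,
    (pvScanA_eq_findall title.toList).1]
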